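-- pv_equiv track=rewrite | github.com/noya2012/collatz-formalization-coq | full_dependency_analysis/major_theorem_dependency_analyzer.py | analyze_dependencies_longest
-- ===== SOURCE A (Python) =====
-- from collections import defaultdict, deque
--
-- def analyze_dependencies_longest(start_theorem, dependencies):
--     if start_theorem not in dependencies:
--         return {}
--
--     best_levels = {}
--     path_stack = set()
--
--     def dfs(node, level):
--         if node in path_stack:
--             return
--
--         prev_level = best_levels.get(node)
--         if prev_level is not None and level <= prev_level:
--             return
--
--         best_levels[node] = level
--         path_stack.add(node)
--
--         for dep in dependencies.get(node, []):
--             dfs(dep, level + 1)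
--
--         path_stack.remove(node)
--
--     dfs(start_theorem, 0)
--
--     levels = defaultdict(list)
--     for theorem, level in best_levels.items():
--         levels[level].append(theorem)
--
--     for level in levels:
--         levels[level].sort()
--
--     return levels
-- ===== SOURCE B (Python) =====
-- def analyze_dependencies_longest(start_theorem, dependencies):
--     if start_theorem not in dependencies:
--         return {}
--
--     best_levels = {}
--     on_path = set()
--
--     # iterative DFS with an explicit instruction stack (LIFO): ("visit", node, level)
--     # explores a node, ("leave", node, _) pops it from the active path afterwards
--     stack = [("visit", start_theorem, 0)]
--     while stack:
--         tag, node, level = stack.pop()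
--         if tag == "leave":
--             on_path.discard(node)
--             continue
--         if node in on_path:
--             continue
--         prev = best_levels.get(node)
--         if prev is not None and level <= prev:
--             continue
--         best_levels[node] = level
--         on_path.add(node)
--         stack.append(("leave", node, 0))
--         for dep in reversed(dependencies.get(node, [])):
--             stack.append(("visit", dep, level + 1))
--
--     groups = {}
--     for theorem, level in best_levels.items():
--         groups.setdefault(level, []).append(theorem)
--     return {level: sorted(names) for level, names in groups.items()}
-- ===== Notes on version B (the rewrite author's own statement) =====
-- stated objective: alternative
-- what changed: The recursive DFS with a mutable path set is replaced by an iterative DFS driven by an explicit LIFO instruction stack of visit/leave frames (children pushed in reverse so sibling order is preserved), and the level grouping is built with setdefault plus a dict comprehension instead of a defaultdict sorted in place.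
import Mathlib
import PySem

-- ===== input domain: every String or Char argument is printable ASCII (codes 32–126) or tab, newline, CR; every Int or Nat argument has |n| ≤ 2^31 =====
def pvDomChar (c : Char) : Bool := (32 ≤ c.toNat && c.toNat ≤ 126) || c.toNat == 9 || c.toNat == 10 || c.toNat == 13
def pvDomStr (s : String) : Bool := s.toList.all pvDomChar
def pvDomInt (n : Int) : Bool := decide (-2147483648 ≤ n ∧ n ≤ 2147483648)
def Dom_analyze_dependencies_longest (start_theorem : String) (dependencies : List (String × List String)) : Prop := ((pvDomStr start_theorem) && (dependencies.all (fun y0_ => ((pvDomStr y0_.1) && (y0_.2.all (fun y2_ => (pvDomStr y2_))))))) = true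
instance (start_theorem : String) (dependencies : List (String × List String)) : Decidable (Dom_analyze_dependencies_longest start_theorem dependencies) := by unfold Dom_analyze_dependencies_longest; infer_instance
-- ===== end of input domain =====

-- B replaces A's recursive DFS by an iterative DFS over an explicit visit/leave instruction
-- stack (alternative decomposition; same values, no Python recursion). Equivalence of the
-- RETURN value is proved; neither version mutates its arguments.

-- ===== PORT A =====
-- Fuel is a totality guard only: each dfs call at depth d runs with fuel F - d, and the
-- recursion depth is bounded by the number of distinct names, which is < F as supplied below.
def pvDfsA (deps : PySem.Dict String (List String)) :
    Nat → String → Int → PySem.Dict String Int → PySem.Set String →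
    PySem.Dict String Int × PySem.Set String
  | 0, _, _, best, path => (best, path)
  | fuel+1, node, level, best, path =>
    if PySem.Set.contains path node then (best, path)
    else if (match PySem.Dict.get? best node with
             | some prev => decide (level ≤ prev)
             | none => false) then (best, path)
    else
      let st := (PySem.Dict.getD deps node []).foldl
          (fun st dep => pvDfsA deps fuel dep (level + 1) st.1 st.2)
          (PySem.Dict.insert best node level, PySem.Set.add path node)
      (st.1, PySem.Set.discard st.2 node)

def analyze_dependencies_longest (start_theorem : String) (dependencies : List (String × List String)) : List (Int × List String) :=
  let deps := PySem.Dict.mk dependencies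
  if PySem.Dict.contains deps start_theorem = false then []
  else
    let fuel := dependencies.length + (dependencies.map (fun p => p.2.length)).sum + 2
    let best := (pvDfsA deps fuel start_theorem 0 PySem.Dict.empty PySem.Set.empty).1
    let levels := best.items.foldl
        (fun (lv : PySem.Dict Int (List String)) tl =>
          PySem.Dict.modify lv tl.2 [] (fun l => l ++ [tl.1]))
        PySem.Dict.empty
    levels.items.map (fun p => (p.1, PySem.List.sorted p.2 (fun x => x) false))

-- ===== PORT B =====
inductive PvInstr where
  | visit : String → Int → Nat → PvInstr
  | leave : String → PvInstr
deriving DecidableEq, Repr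

def pvMaxDeps (deps : PySem.Dict String (List String)) : Nat :=
  (PySem.Dict.items deps).foldl (fun m p => Nat.max m p.2.length) 0

def pvW (D : Nat) : Nat → Nat
  | 0 => 1
  | f+1 => D * pvW D f + 2

def pvWeight (D : Nat) : PvInstr → Nat
  | .visit _ _ f => pvW D f
  | .leave _ => 1

-- termination helpers for pvRunB (cited in its decreasing_by)
theorem pv_foldl_max_init_le (l : List (String × List String)) (b : Nat) :
    b ≤ l.foldl (fun m p => Nat.max m p.2.length) b := by
  induction l generalizing b with
  | nil => simp
  | cons x xs ih => exact le_trans (Nat.le_max_left _ _) (ih _)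

theorem pv_mem_le_foldl_max (l : List (String × List String)) (p : String × List String)
    (hp : p ∈ l) (b : Nat) : p.2.length ≤ l.foldl (fun m q => Nat.max m q.2.length) b := by
  induction l generalizing b with
  | nil => cases hp
  | cons x xs ih =>
    rcases List.mem_cons.mp hp with h | h
    · subst h; exact le_trans (Nat.le_max_right _ _) (pv_foldl_max_init_le _ _)
    · exact ih h _

theorem pv_getD_len_le (deps : PySem.Dict String (List String)) (n : String) :
    (PySem.Dict.getD deps n []).length ≤ pvMaxDeps deps := by
  rw [PySem.Dict.getD_eq_get?_getD]
  cases h : PySem.Dict.get? deps n with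
  | none => simp
  | some v =>
    have hm : (n, v) ∈ (PySem.Dict.items deps) := PySem.Dict.mem_items_of_get?_eq_some deps h
    simpa using pv_mem_le_foldl_max _ _ hm 0

-- iterative DFS: the stack head is the next instruction; children are pushed in
-- dependency order (Source B pushes them reversed onto the end of its list stack)
def pvRunB (deps : PySem.Dict String (List String)) :
    List PvInstr → PySem.Dict String Int → PySem.Set String →
    PySem.Dict String Int × PySem.Set String
  | [], best, path => (best, path)
  | .leave node :: rest, best, path => pvRunB deps rest best (PySem.Set.discard path node)
  | .visit _ _ 0 :: rest, best, path => pvRunB deps rest best path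
  | .visit node level (f+1) :: rest, best, path =>
    if PySem.Set.contains path node then pvRunB deps rest best path
    else if (match PySem.Dict.get? best node with
             | some prev => decide (level ≤ prev)
             | none => false) then pvRunB deps rest best path
    else
      pvRunB deps
        ((PySem.Dict.getD deps node []).map (fun dep => PvInstr.visit dep (level + 1) f)
          ++ PvInstr.leave node :: rest)
        (PySem.Dict.insert best node level) (PySem.Set.add path node)
termination_by stack _ _ => (stack.map (pvWeight (pvMaxDeps deps))).sum
decreasing_by
  all_goals simp only [pvWeight, pvW, List.map_append, List.map_cons, List.map_map,
    Function.comp_def, List.sum_append, List.sum_cons, List.map_const', List.sum_replicate,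
    smul_eq_mul]
  all_goals try omega
  all_goals
    { have hmul : (PySem.Dict.getD deps node []).length * pvW (pvMaxDeps deps) f
          ≤ pvMaxDeps deps * pvW (pvMaxDeps deps) f :=
        Nat.mul_le_mul_right _ (pv_getD_len_le deps node)
      omega }

def analyze_dependencies_longest_alt (start_theorem : String) (dependencies : List (String × List String)) : List (Int × List String) :=
  let deps := PySem.Dict.mk dependencies
  if PySem.Dict.contains deps start_theorem then
    let fuel := dependencies.length + (dependencies.map (fun p => p.2.length)).sum + 2
    let best := (pvRunB deps [PvInstr.visit start_theorem 0 fuel] PySem.Dict.empty PySem.Set.empty).1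
    let groups := best.items.foldl
        (fun (g : PySem.Dict Int (List String)) tl =>
          PySem.Dict.modify g tl.2 [] (fun ns => ns ++ [tl.1]))
        PySem.Dict.empty
    groups.items.map (fun p => (p.1, PySem.List.sorted p.2 (fun x => x) false))
  else []

-- ===== PRECONDITION & SPEC =====
def Spec_analyze_dependencies_longest (start_theorem : String) (dependencies : List (String × List String)) (out : List (Int × List String)) : Prop := out = analyze_dependencies_longest_alt start_theorem dependencies
instance (start_theorem : String) (dependencies : List (String × List String)) (out : List (Int × List String)) : Decidable (Spec_analyze_dependencies_longest start_theorem dependencies out) := by unfold Spec_analyze_dependencies_longest; infer_instance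

-- ===== CLAIM (what is proved, stated in full; the proofs are below) =====
def Claim_equal_analyze_dependencies_longest : Prop := ∀ (start_theorem : String) (dependencies : List (String × List String)), Dom_analyze_dependencies_longest start_theorem dependencies → Spec_analyze_dependencies_longest start_theorem dependencies (analyze_dependencies_longest start_theorem dependencies)

-- ===== LEMMAS AND PROOFS =====

theorem pvRunB_nil (deps : PySem.Dict String (List String)) (best path) :
    pvRunB deps [] best path = (best, path) := by
  simp [pvRunB]

theorem pvRunB_leave (deps : PySem.Dict String (List String)) (node rest best path) :
    pvRunB deps (PvInstr.leave node :: rest) best path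
      = pvRunB deps rest best (PySem.Set.discard path node) := by
  simp [pvRunB]

-- processing a visit instruction on the machine is exactly one recursive dfs call of A
theorem pvRunB_visit (deps : PySem.Dict String (List String)) (f : Nat) :
    ∀ (node : String) (level : Int) (rest : List PvInstr) (best path),
    pvRunB deps (PvInstr.visit node level f :: rest) best path
      = pvRunB deps rest (pvDfsA deps f node level best path).1
          (pvDfsA deps f node level best path).2 := by
  induction f with
  | zero => intro node level rest best path; simp [pvRunB, pvDfsA]
  | succ f ih =>
    have hQ : ∀ (cs : List String) (level : Int) (rest : List PvInstr) (best path),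
        pvRunB deps (cs.map (fun dep => PvInstr.visit dep level f) ++ rest) best path
          = pvRunB deps rest
              (cs.foldl (fun st dep => pvDfsA deps f dep level st.1 st.2) (best, path)).1
              (cs.foldl (fun st dep => pvDfsA deps f dep level st.1 st.2) (best, path)).2 := by
      intro cs
      induction cs with
      | nil => intro level rest best path; simp
      | cons c cs ihc =>
        intro level rest best path
        simp only [List.map_cons, List.cons_append, List.foldl_cons]
        rw [ih, ihc]
    intro node level rest best path
    rw [pvRunB, pvDfsA]
    by_cases h1 : node ∈ path
    · simp [h1, PySem.Set.contains]
    · simp only [PySem.Set.contains]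
      by_cases h2 : (match PySem.Dict.get? best node with
             | some prev => decide (level ≤ prev)
             | none => false) = true
      · simp [h2]
      · simp only [h2]
        rw [hQ]
        rw [pvRunB_leave]
        simp [List.contains_eq_mem, h1]

-- ===== VERDICT (by name: the statement is the Claim_ definition above) =====
theorem analyze_dependencies_longest_spec : Claim_equal_analyze_dependencies_longest := by
  intro start_theorem dependencies _hdom
  unfold Spec_analyze_dependencies_longest
  unfold analyze_dependencies_longest analyze_dependencies_longest_alt
  by_cases h : PySem.Dict.contains (PySem.Dict.mk dependencies) start_theorem
  · simp only [h, if_true, Bool.true_eq_false, if_false]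
    rw [pvRunB_visit, pvRunB_nil]
  · simp [h]
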